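-- pv_equiv track=rewrite | github.com/laycom/educational_projects | less_8/dz/less_8_task_1.py | friends_handshake
-- ===== SOURCE A (Python) =====
-- def friends_handshake(n):
--     handshake = [[1 if i != j else 0 for i in range(n)] for j in range(n)]
--     sum = 0
--     for i, items in enumerate(handshake):
--         for item in items[i:]:
--             if item == 1:
--                 sum += 1
--     return(sum)
--
-- n = 10
-- ===== SOURCE B (Python) =====
-- def friends_handshake(n):
--     # closed form: each of the n friends shakes hands with n-1 others, each pair counted once
--     return n * (n - 1) // 2 if n > 0 else 0
-- ===== Notes on version B (the rewrite author's own statement) =====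
-- stated objective: faster
-- what changed: Replaces the O(n^2) construction of an n-by-n 0/1 matrix and the nested counting loops with the closed form n*(n-1)//2 (0 for n <= 0).
import Mathlib
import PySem

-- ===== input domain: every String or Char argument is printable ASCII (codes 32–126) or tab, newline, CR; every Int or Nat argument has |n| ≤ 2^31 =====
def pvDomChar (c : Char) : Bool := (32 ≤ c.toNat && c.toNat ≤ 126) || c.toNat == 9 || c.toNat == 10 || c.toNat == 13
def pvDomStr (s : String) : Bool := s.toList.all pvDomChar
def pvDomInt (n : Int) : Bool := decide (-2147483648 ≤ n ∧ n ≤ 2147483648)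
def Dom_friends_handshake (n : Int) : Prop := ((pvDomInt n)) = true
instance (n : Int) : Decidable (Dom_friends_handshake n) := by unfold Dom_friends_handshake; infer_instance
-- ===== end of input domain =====

-- B replaces A's O(n^2) matrix construction and nested counting loops by the closed form n*(n-1)//2.

-- ===== PORT A =====
def friends_handshake (n : Int) : Int :=
  let handshake : List (List Int) :=
    (PySem.List.pyRange 0 n 1).map (fun j =>
      (PySem.List.pyRange 0 n 1).map (fun i => if i ≠ j then (1 : Int) else 0))
  let sum : Int :=
    (PySem.List.enumerate handshake 0).foldl (fun sum p =>
      (PySem.List.slice p.2 (some p.1) none).foldl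
        (fun sum item => if item == (1 : Int) then sum + 1 else sum) sum) 0
  sum

-- ===== PORT B =====
def friends_handshake_alt (n : Int) : Int :=
  if n > 0 then PySem.Int.floordiv (n * (n - 1)) 2 else 0

-- ===== PRECONDITION & SPEC =====
def Spec_friends_handshake (n : Int) (out : Int) : Prop := out = friends_handshake_alt n
instance (n : Int) (out : Int) : Decidable (Spec_friends_handshake n out) := by unfold Spec_friends_handshake; infer_instance

-- ===== CLAIM (what is proved, stated in full; the proofs are below) =====
def Claim_equal_friends_handshake : Prop := ∀ (n : Int), Dom_friends_handshake n → Spec_friends_handshake n (friends_handshake n)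

-- ===== LEMMAS AND PROOFS =====

-- the row A builds for index j, as a map over List.range m
def pvRow (m : Nat) (j : Int) : List Int :=
  (List.range m).map (fun (i : Nat) => if (i : Int) ≠ j then (1 : Int) else 0)

lemma pvSumMapRange (n : Nat) (f : Nat → Int) :
    ((List.range n).map f).sum = ∑ i ∈ Finset.range n, f i := by
  induction n with
  | zero => simp
  | succ k ih => rw [List.range_succ, Finset.sum_range_succ]; simp [ih]

-- count of 1s in the tail items[k:] of row k
lemma pvRow_drop_count (m k : Nat) (hk : k < m) :
    ((pvRow m (k : Int)).drop k).count (1 : Int) = m - k - 1 := by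
  unfold pvRow
  rw [← List.map_drop]
  have hdr : (List.range m).drop k = List.range' k (m - k) := by
    rw [List.range_eq_range', List.drop_range']; norm_num
  rw [hdr]
  have hmk : m - k = (m - k - 1) + 1 := by omega
  rw [hmk, List.range'_succ, List.map_cons, List.count_cons]
  have h0 : (if ((k : Nat) : Int) ≠ (k : Int) then (1 : Int) else 0) = 0 := by simp
  rw [h0, List.count_eq_countP, List.countP_map]
  have hall : ∀ x ∈ List.range' (k + 1) (m - k - 1),
      ((fun x => x == (1 : Int)) ∘ (fun (i : Nat) => if (i : Int) ≠ (k : Int) then (1 : Int) else 0)) x = true := by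
    intro x hx
    have hx' := List.mem_range'.mp hx
    have hxk : x ≠ k := by omega
    simp [hxk]
  rw [List.countP_eq_length.mpr hall, List.length_range']
  simp

lemma pvSum_nat (m : Nat) : (∑ k ∈ Finset.range m, (m - k - 1)) = m * (m - 1) / 2 := by
  have h1 : ∀ k, m - k - 1 = m - 1 - k := by omega
  simp only [h1]
  rw [Finset.sum_range_reflect (fun j => j) m]
  exact Finset.sum_range_id m

-- the matrix A builds for n = m is row k = pvRow m k
lemma pvMatrix_eq (m : Nat) :
    (PySem.List.pyRange 0 (m : Int) 1).map (fun j =>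
      (PySem.List.pyRange 0 (m : Int) 1).map (fun i => if i ≠ j then (1 : Int) else 0))
    = (List.range m).map (fun (k : Nat) => pvRow m (k : Int)) := by
  apply List.ext_getElem
  · simp [PySem.List.length_pyRange_one]
  · intro k h1 h2
    simp only [List.getElem_map, PySem.List.getElem_pyRange_one, List.getElem_range, zero_add]
    apply List.ext_getElem
    · simp [PySem.List.length_pyRange_one, pvRow]
    · intro i hi1 hi2
      simp only [List.getElem_map, PySem.List.getElem_pyRange_one, List.getElem_range, zero_add, pvRow]

theorem friends_handshake_spec : Claim_equal_friends_handshake := by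
  unfold Claim_equal_friends_handshake Spec_friends_handshake
  intro n _
  unfold friends_handshake friends_handshake_alt
  by_cases hn : 0 < n
  · obtain ⟨m, rfl⟩ : ∃ m : Nat, n = (m : Int) := ⟨n.toNat, (Int.toNat_of_nonneg (le_of_lt hn)).symm⟩
    have hm : 0 < m := by exact_mod_cast hn
    simp only [if_pos hn]
    rw [pvMatrix_eq m]
    rw [PySem.List.foldl_congr_mem _ _
        (fun s (p : Int × List Int) =>
          s + ((PySem.List.slice p.2 (some p.1) none).count (1 : Int) : Int)) 0
        (fun acc x _ => PySem.List.foldl_beq_add_one _ _ _)]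
    rw [PySem.List.foldl_add]
    have hlist : (PySem.List.enumerate ((List.range m).map (fun (k : Nat) => pvRow m (k : Int))) 0).map
        (fun p => ((PySem.List.slice p.2 (some p.1) none).count (1 : Int) : Int))
        = (List.range m).map (fun k => ((m - k - 1 : Nat) : Int)) := by
      apply List.ext_getElem
      · simp [PySem.List.length_enumerate]
      · intro k h1 h2
        have hk : k < m := by
          simpa [PySem.List.length_enumerate] using h1
        simp only [List.getElem_map, PySem.List.getElem_enumerate, List.getElem_range, zero_add]
        rw [PySem.List.slice_from_natCast, pvRow_drop_count m k hk]
    rw [hlist, pvSumMapRange, ← Nat.cast_sum, pvSum_nat]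
    have h2 : PySem.Int.floordiv ((m : Int) * ((m : Int) - 1)) 2
        = ((m * (m - 1) / 2 : Nat) : Int) := by
      have hc : (m : Int) * ((m : Int) - 1) = ((m * (m - 1) : Nat) : Int) := by
        push_cast [Nat.cast_sub hm]
        ring
      rw [hc]
      exact_mod_cast PySem.Int.floordiv_natCast (m * (m - 1)) 2
    rw [h2]
    simp
  · rw [PySem.List.pyRange_one_eq_nil (by omega)]
    simp [hn]
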